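-- pv_equiv track=rewrite | github.com/rchermanteev/my_projects | introductory_hackathon_in_safeboard_2019/task1.py | find_better
-- ===== SOURCE A (Python) =====
-- def find_better(input_list):
--     test = input_list.copy()
--     max_el = max(test, key=lambda x: x[1])
--     min_el = max_el
--     while min_el[0] >= max_el[0]:
--         test.remove(min_el)
--         min_el = min(test, key=lambda x: x[1])
--
--     return min_el, max_el
-- ===== SOURCE B (Python) =====
-- def find_better(input_list):
--     max_el = max(input_list, key=lambda p: p[1])
--     min_el = min((p for p in input_list if p[0] < max_el[0]), key=lambda p: p[1])
--     return min_el, max_el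
-- ===== Notes on version B (the rewrite author's own statement) =====
-- stated objective: simpler
-- what changed: Replaced A's destructive remove-current-min-and-rescan while loop by a single filter keeping the elements whose x lies below the y-maximal element's x, followed by one min-by-y pass; Pre_ excludes exactly the inputs on which A raises ValueError (both implementations raise there).
import Mathlib
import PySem

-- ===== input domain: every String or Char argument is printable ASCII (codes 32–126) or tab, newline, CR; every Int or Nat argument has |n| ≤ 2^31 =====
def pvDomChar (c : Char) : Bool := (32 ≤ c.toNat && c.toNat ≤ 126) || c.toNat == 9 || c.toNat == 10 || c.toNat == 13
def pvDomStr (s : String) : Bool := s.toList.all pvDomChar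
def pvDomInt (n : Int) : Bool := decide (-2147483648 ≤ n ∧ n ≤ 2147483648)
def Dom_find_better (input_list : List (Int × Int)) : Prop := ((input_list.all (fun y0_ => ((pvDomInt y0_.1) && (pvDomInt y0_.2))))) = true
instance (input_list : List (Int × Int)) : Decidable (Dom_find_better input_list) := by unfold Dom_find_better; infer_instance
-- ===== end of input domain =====

-- B replaces A's repeated remove-and-rescan loop by one filter + one min pass over the original list.


-- ===== PORT A =====
-- the while loop: 'while min_el[0] >= max_el[0]: test.remove(min_el); min_el = min(test, key=...)'
-- fuel bounds the iterations (each one removes an element); the default pair marks the excluded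
-- ValueError states (min/remove of a missing element), never reached under Pre_.
def findBetterLoop (fuel : Nat) (test : List (Int × Int)) (max_el min_el : Int × Int) :
    (Int × Int) × (Int × Int) :=
  match fuel with
  | 0 => ((0, 0), (0, 0))
  | fuel + 1 =>
    if max_el.1 ≤ min_el.1 then
      match PySem.List.remove? test min_el with
      | none => ((0, 0), (0, 0))
      | some test' =>
        match PySem.List.min? test' (fun p => p.2) with
        | none => ((0, 0), (0, 0))
        | some m => findBetterLoop fuel test' max_el m
    else (min_el, max_el)

def find_better (input_list : List (Int × Int)) : (Int × Int) × (Int × Int) :=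
  match PySem.List.max? input_list (fun p => p.2) with
  | none => ((0, 0), (0, 0))
  | some max_el => findBetterLoop (input_list.length + 1) input_list max_el max_el

-- ===== PORT B =====
def find_better_alt (input_list : List (Int × Int)) : (Int × Int) × (Int × Int) :=
  match PySem.List.max? input_list (fun p => p.2) with
  | none => ((0, 0), (0, 0))
  | some max_el =>
    match PySem.List.min? (input_list.filter (fun p => decide (p.1 < max_el.1))) (fun p => p.2) with
    | none => ((0, 0), (0, 0))
    | some min_el => (min_el, max_el)

-- ===== PRECONDITION & SPEC =====
-- Pre_ excludes exactly the inputs where A raises ValueError: those with no element whose x is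
-- smaller than the x of the first y-maximal element (A then empties the list and calls min of
-- nothing); B raises there too.
def Pre_find_better (input_list : List (Int × Int)) : Prop :=
  ∃ p ∈ input_list, p.1 < ((PySem.List.max? input_list (fun q => q.2)).getD (0, 0)).1
instance (input_list : List (Int × Int)) : Decidable (Pre_find_better input_list) := by
  unfold Pre_find_better; infer_instance

def pvWitness_find_better : (List (Int × Int)) := [(0, 1), (5, 9)]

def Spec_find_better (input_list : List (Int × Int)) (out : (Int × Int) × (Int × Int)) : Prop :=
  out = find_better_alt input_list
instance (input_list : List (Int × Int)) (out : (Int × Int) × (Int × Int)) :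
    Decidable (Spec_find_better input_list out) := by unfold Spec_find_better; infer_instance

-- ===== CLAIM =====
def Claim_equal_find_better : Prop := ∀ (input_list : List (Int × Int)),
  Dom_find_better input_list → Pre_find_better input_list →
  Spec_find_better input_list (find_better input_list)

-- ===== LEMMAS AND PROOFS =====

-- step function of PySem.List.min? with a non-empty accumulator
def pvMinStep (key : (Int × Int) → Int) (a x : Int × Int) : Int × Int :=
  if key x < key a then x else a

theorem pvMin?_cons (key : (Int × Int) → Int) :
    ∀ (xs : List (Int × Int)) (x : Int × Int),
    PySem.List.min? (x :: xs) key = some (xs.foldl (pvMinStep key) x) := by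
  intro xs
  induction xs with
  | nil => intro x; rfl
  | cons y t ih =>
    intro x
    have hstep : PySem.List.min? (x :: y :: t) key
        = PySem.List.min? (pvMinStep key x y :: t) key := by
      show List.foldl _ (some x) (y :: t) = List.foldl _ (some (pvMinStep key x y)) t
      rw [List.foldl_cons]
      congr 1
      show (if key y < key x then some y else some x) = some (pvMinStep key x y)
      unfold pvMinStep
      split_ifs <;> rfl
    rw [hstep, ih]
    rfl

theorem pvFoldl_const (key : (Int × Int) → Int) (l : List (Int × Int)) (a : Int × Int)
    (h : ∀ x ∈ l, key a ≤ key x) : l.foldl (pvMinStep key) a = a := by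
  induction l with
  | nil => rfl
  | cons y t ih =>
    have hy := h y (by simp)
    simp only [List.foldl_cons, pvMinStep, if_neg (not_lt.mpr hy)]
    exact ih (fun x hx => h x (by simp [hx]))

-- the result of the running-min fold is either the start or a "first strict min" in the list
theorem pvFoldl_decomp (key : (Int × Int) → Int) (l : List (Int × Int)) (a : Int × Int) :
    (l.foldl (pvMinStep key) a = a ∧ ∀ x ∈ l, key a ≤ key x) ∨
    (∃ l₁ l₂, l = l₁ ++ l.foldl (pvMinStep key) a :: l₂ ∧
      key (l.foldl (pvMinStep key) a) < key a ∧
      (∀ x ∈ l₁, key (l.foldl (pvMinStep key) a) < key x) ∧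
      (∀ x ∈ l₂, key (l.foldl (pvMinStep key) a) ≤ key x)) := by
  induction l generalizing a with
  | nil => left; simp
  | cons y t ih =>
    simp only [List.foldl_cons, pvMinStep]
    by_cases hy : key y < key a
    · rw [if_pos hy]
      rcases ih y with ⟨heq, hall⟩ | ⟨l₁, l₂, hdec, hlt, h₁, h₂⟩
      · right
        exact ⟨[], t, by simp [heq], by rw [heq]; exact hy,
          by simp, by rw [heq]; exact hall⟩
      · right
        refine ⟨y :: l₁, l₂, by rw [List.cons_append, ← hdec], lt_trans hlt hy, ?_, h₂⟩
        intro x hx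
        rcases List.mem_cons.mp hx with rfl | hx
        · exact hlt
        · exact h₁ x hx
    · rw [if_neg hy]
      rcases ih a with ⟨heq, hall⟩ | ⟨l₁, l₂, hdec, hlt, h₁, h₂⟩
      · left
        refine ⟨heq, fun x hx => ?_⟩
        rcases List.mem_cons.mp hx with rfl | hx
        · exact not_lt.mp hy
        · exact hall x hx
      · right
        refine ⟨y :: l₁, l₂, by rw [List.cons_append, ← hdec], hlt, ?_, h₂⟩
        intro x hx
        rcases List.mem_cons.mp hx with rfl | hx
        · exact lt_of_lt_of_le hlt (not_lt.mp hy)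
        · exact h₁ x hx

-- forward characterisation: min? returns the FIRST key-minimal element
theorem pvMin?_decomp (key : (Int × Int) → Int) (l : List (Int × Int)) (m : Int × Int)
    (h : PySem.List.min? l key = some m) :
    ∃ l₁ l₂, l = l₁ ++ m :: l₂ ∧ (∀ x ∈ l₁, key m < key x) ∧ (∀ x ∈ l₂, key m ≤ key x) := by
  match l with
  | [] => simp [PySem.List.min?] at h
  | x :: xs =>
    rw [pvMin?_cons] at h
    have hm : xs.foldl (pvMinStep key) x = m := Option.some.inj h
    rcases pvFoldl_decomp key xs x with ⟨heq, hall⟩ | ⟨l₁, l₂, hdec, hlt, h₁, h₂⟩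
    · exact ⟨[], xs, by rw [← hm, heq]; rfl, by simp, by rw [← hm, heq]; exact hall⟩
    · rw [hm] at hdec hlt h₁ h₂
      refine ⟨x :: l₁, l₂, by rw [List.cons_append, ← hdec], ?_, h₂⟩
      intro z hz
      rcases List.mem_cons.mp hz with rfl | hz
      · exact hlt
      · exact h₁ z hz

-- backward characterisation
theorem pvFoldl_mid (key : (Int × Int) → Int) (l₂ : List (Int × Int)) (m : Int × Int)
    (h₂ : ∀ x ∈ l₂, key m ≤ key x) :
    ∀ (l₁ : List (Int × Int)) (a : Int × Int), key m < key a → (∀ x ∈ l₁, key m < key x) →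
    (l₁ ++ m :: l₂).foldl (pvMinStep key) a = m := by
  intro l₁
  induction l₁ with
  | nil =>
    intro a ha _
    simp only [List.nil_append, List.foldl_cons, pvMinStep, if_pos ha]
    exact pvFoldl_const key l₂ m h₂
  | cons y t ih =>
    intro a ha h₁
    have hy := h₁ y (by simp)
    have ht : ∀ x ∈ t, key m < key x := fun x hx => h₁ x (by simp [hx])
    simp only [List.cons_append, List.foldl_cons, pvMinStep]
    split_ifs
    · exact ih y hy ht
    · exact ih a ha ht

theorem pvMin?_of_decomp (key : (Int × Int) → Int) (l₁ l₂ : List (Int × Int)) (m : Int × Int)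
    (h₁ : ∀ x ∈ l₁, key m < key x) (h₂ : ∀ x ∈ l₂, key m ≤ key x) :
    PySem.List.min? (l₁ ++ m :: l₂) key = some m := by
  cases l₁ with
  | nil =>
    rw [List.nil_append, pvMin?_cons, pvFoldl_const key l₂ m h₂]
  | cons y t =>
    rw [List.cons_append, pvMin?_cons]
    have hy := h₁ y (by simp)
    have ht : ∀ x ∈ t, key m < key x := fun x hx => h₁ x (by simp [hx])
    rw [pvFoldl_mid key l₂ m h₂ t y hy ht]

-- min? restricted to a filter containing the minimum is unchanged
theorem pvMin?_filter (key : (Int × Int) → Int) (p : (Int × Int) → Bool)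
    (l : List (Int × Int)) (m : Int × Int)
    (h : PySem.List.min? l key = some m) (hp : p m = true) :
    PySem.List.min? (l.filter p) key = some m := by
  rcases pvMin?_decomp key l m h with ⟨l₁, l₂, rfl, h₁, h₂⟩
  rw [List.filter_append, List.filter_cons, if_pos hp]
  exact pvMin?_of_decomp key _ _ m
    (fun x hx => h₁ x (List.mem_of_mem_filter hx))
    (fun x hx => h₂ x (List.mem_of_mem_filter hx))

-- erasing a non-candidate does not change the candidate list
theorem pvFilter_erase (p : (Int × Int) → Bool) (l : List (Int × Int)) (a : Int × Int)
    (hp : p a = false) : (l.erase a).filter p = l.filter p := by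
  induction l with
  | nil => rfl
  | cons y t ih =>
    by_cases hya : y = a
    · subst hya
      rw [List.erase_cons_head, List.filter_cons, if_neg (by simp [hp])]
    · rw [List.erase_cons_tail (by simp [hya]), List.filter_cons, List.filter_cons]
      by_cases hpy : p y = true
      · rw [if_pos hpy, if_pos hpy, ih]
      · rw [if_neg hpy, if_neg hpy, ih]

-- the loop computes min? of the candidates, provided min_el is the current stable minimum
theorem pvLoop_spec (mx : Int × Int) :
    ∀ (fuel : Nat) (test : List (Int × Int)) (min_el w : Int × Int),
    test.length < fuel →
    PySem.List.min? test (fun p => p.2) = some min_el →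
    PySem.List.min? (test.filter (fun p => decide (p.1 < mx.1))) (fun p => p.2) = some w →
    findBetterLoop fuel test mx min_el = (w, mx) := by
  intro fuel
  induction fuel with
  | zero => intro test min_el w h; omega
  | succ n ih =>
    intro test min_el w hlen hmin hw
    have hmem : min_el ∈ test := PySem.List.min?_mem hmin
    unfold findBetterLoop
    by_cases hge : mx.1 ≤ min_el.1
    · rw [if_pos hge, PySem.List.remove?_eq_some_erase test min_el hmem]
      dsimp only
      have hfe : (test.erase min_el).filter (fun p => decide (p.1 < mx.1))
          = test.filter (fun p => decide (p.1 < mx.1)) :=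
        pvFilter_erase _ test min_el (by simp; omega)
      have hne : test.erase min_el ≠ [] := by
        intro hnil
        have hwmem : w ∈ test.filter (fun p => decide (p.1 < mx.1)) := PySem.List.min?_mem hw
        rw [← hfe, hnil] at hwmem
        simp at hwmem
      obtain ⟨m', hm'⟩ : ∃ m', PySem.List.min? (test.erase min_el) (fun p => p.2) = some m' := by
        cases h : PySem.List.min? (test.erase min_el) (fun p => p.2) with
        | none => exact absurd ((PySem.List.min?_eq_none_iff _ _).mp h) hne
        | some m' => exact ⟨m', rfl⟩
      rw [hm']
      dsimp only
      exact ih (test.erase min_el) m' w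
        (by have h1 := List.length_erase_of_mem hmem; have h2 := List.length_pos_of_mem hmem; omega)
        hm' (by rw [hfe]; exact hw)
    · rw [if_neg hge]
      have : PySem.List.min? (test.filter (fun p => decide (p.1 < mx.1))) (fun p => p.2)
          = some min_el :=
        pvMin?_filter _ _ test min_el hmin (by simp; omega)
      rw [this] at hw
      exact congrArg (·, mx) (Option.some.inj hw)

-- ===== VERDICT =====
theorem find_better_spec : Claim_equal_find_better := by
  unfold Claim_equal_find_better
  intro l _hdom hpre
  unfold Spec_find_better Pre_find_better at *
  obtain ⟨q, hq, hqlt⟩ := hpre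
  have hne : l ≠ [] := by intro h; subst h; simp at hq
  obtain ⟨mx, hmx⟩ : ∃ mx, PySem.List.max? l (fun p => p.2) = some mx := by
    cases h : PySem.List.max? l (fun p => p.2) with
    | none => exact absurd ((PySem.List.max?_eq_none_iff _ _).mp h) hne
    | some mx => exact ⟨mx, rfl⟩
  rw [hmx] at hqlt
  simp only [Option.getD_some] at hqlt
  unfold find_better find_better_alt
  rw [hmx]
  dsimp only
  -- the candidate list is non-empty, so B's min? is some
  have hqf : q ∈ l.filter (fun p => decide (p.1 < mx.1)) :=
    List.mem_filter.mpr ⟨hq, by simp; omega⟩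
  obtain ⟨w, hw⟩ : ∃ w,
      PySem.List.min? (l.filter (fun p => decide (p.1 < mx.1))) (fun p => p.2) = some w := by
    cases h : PySem.List.min? (l.filter (fun p => decide (p.1 < mx.1))) (fun p => p.2) with
    | none =>
      have := (PySem.List.min?_eq_none_iff _ _).mp h
      rw [this] at hqf; simp at hqf
    | some w => exact ⟨w, rfl⟩
  rw [hw]
  dsimp only
  -- A's first iteration: min_el = max_el, the test always fires, max_el is removed
  have hmxmem : mx ∈ l := PySem.List.max?_mem hmx
  have hlen : 0 < l.length := List.length_pos_iff.mpr hne
  unfold findBetterLoop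
  rw [if_pos le_rfl, PySem.List.remove?_eq_some_erase l mx hmxmem]
  dsimp only
  have hfe : (l.erase mx).filter (fun p => decide (p.1 < mx.1))
      = l.filter (fun p => decide (p.1 < mx.1)) :=
    pvFilter_erase _ l mx (by simp)
  have hne' : l.erase mx ≠ [] := by
    intro hnil
    rw [← hfe, hnil] at hqf
    simp at hqf
  obtain ⟨m', hm'⟩ : ∃ m', PySem.List.min? (l.erase mx) (fun p => p.2) = some m' := by
    cases h : PySem.List.min? (l.erase mx) (fun p => p.2) with
    | none => exact absurd ((PySem.List.min?_eq_none_iff _ _).mp h) hne'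
    | some m' => exact ⟨m', rfl⟩
  rw [hm']
  dsimp only
  exact pvLoop_spec mx l.length (l.erase mx) m' w
    (by have h1 := List.length_erase_of_mem hmxmem; have h2 := List.length_pos_of_mem hmxmem; omega)
    hm' (by rw [hfe]; exact hw)
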